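-- pv_equiv track=rewrite | github.com/unus-all/crm-app | help.py | get_orders_ids
-- ===== SOURCE A (Python) =====
-- def get_orders_ids(data):
--     yearly_ids = {}
--     orders = []
--     for index, (order, date) in enumerate(sorted(data, key=lambda x: x[1]), start=1):
--         year = date[:4]  # Extract the year from the date string
--         if year not in yearly_ids:
--             yearly_ids[year] = 1
--         else:
--             yearly_ids[year] += 1
--         orders.append((f"{year}/{yearly_ids[year]:02d}", order, date))
--     return orders
-- ===== SOURCE B (Python) =====
-- def get_orders_ids(data):
--     # Sort once; the year is a 4-char prefix of the sort key, so equal years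
--     # are contiguous: split the sorted list into year runs and number each run.
--     rest = sorted(data, key=lambda x: x[1])
--     out = []
--     while rest:
--         year = rest[0][1][:4]
--         n = 1
--         while n < len(rest) and rest[n][1][:4] == year:
--             n += 1
--         run, rest = rest[:n], rest[n:]
--         out.extend((f"{year}/{k:02d}", order, date)
--                    for k, (order, date) in enumerate(run, start=1))
--     return out
-- ===== Notes on version B (the rewrite author's own statement) =====
-- stated objective: simpler
-- what changed: A threads a running dict of per-year counters through one pass over the sorted list; B instead splits the sorted list into contiguous same-year runs (valid since the year is a prefix of the sort key) and numbers each run with enumerate(start=1), needing no counter state.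
import Mathlib
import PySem

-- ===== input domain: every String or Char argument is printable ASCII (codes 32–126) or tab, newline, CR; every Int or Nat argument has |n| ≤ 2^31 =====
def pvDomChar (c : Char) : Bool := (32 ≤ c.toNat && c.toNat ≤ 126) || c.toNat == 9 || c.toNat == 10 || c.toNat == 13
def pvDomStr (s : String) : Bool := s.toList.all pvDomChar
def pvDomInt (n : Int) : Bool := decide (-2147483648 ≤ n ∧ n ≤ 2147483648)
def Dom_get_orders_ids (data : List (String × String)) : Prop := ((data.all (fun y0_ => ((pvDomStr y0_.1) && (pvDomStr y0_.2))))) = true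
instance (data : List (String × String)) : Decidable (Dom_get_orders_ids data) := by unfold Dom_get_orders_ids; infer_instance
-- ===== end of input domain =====

-- B replaces A's running dict of per-year counters by a single split of the
-- sorted list into contiguous year runs, numbering each run with enumerate
-- (objective: simpler — valid because the year is a prefix of the sort key).

-- date[:4], shared by both ports
def pvYear (date : String) : String := PySem.Str.slice date none (some 4)

-- f"{year}/{n:02d}" — zero-pad to width 2 is exactly zfill for ints
def pvFmt (year : String) (n : Int) : String :=
  year ++ "/" ++ PySem.Str.zfill (PySem.Int.toStr n) 2

-- ===== PORT A =====
def get_orders_ids (data : List (String × String)) : List (String × String × String) :=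
  ((PySem.List.sorted data (fun x => x.2)).foldl
    (fun (st : PySem.Dict String Int × List (String × String × String)) p =>
      let year := pvYear p.2
      let yearly := if st.1.contains year = false then st.1.insert year 1
                    else st.1.modify year 0 (· + 1)
      (yearly, st.2 ++ [(pvFmt year (yearly.getD year 0), p.1, p.2)]))
    (PySem.Dict.empty, [])).2

-- ===== PORT B =====
-- the 'while rest:' loop of Source B, totalised by fuel (= initial length)
def altRuns : Nat → List (String × String) → List (String × String × String)
  | 0, _ => []
  | _ + 1, [] => []
  | fuel + 1, p :: rest =>
    let year := pvYear p.2
    let run := p :: rest.takeWhile (fun q => pvYear q.2 == year)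
    let rest' := rest.dropWhile (fun q => pvYear q.2 == year)
    (PySem.List.enumerate run 1).map (fun kq => (pvFmt year kq.1, kq.2.1, kq.2.2))
      ++ altRuns fuel rest'

def get_orders_ids_alt (data : List (String × String)) : List (String × String × String) :=
  let srt := PySem.List.sorted data (fun x => x.2)
  altRuns srt.length srt

-- ===== PRECONDITION & SPEC =====
def Spec_get_orders_ids (data : List (String × String)) (out : List (String × String × String)) : Prop := out = get_orders_ids_alt data
instance (data : List (String × String)) (out : List (String × String × String)) : Decidable (Spec_get_orders_ids data out) := by unfold Spec_get_orders_ids; infer_instance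

-- ===== CLAIM (what is proved, stated in full; the proofs are below) =====
def Claim_equal_get_orders_ids : Prop := ∀ (data : List (String × String)), Dom_get_orders_ids data → Spec_get_orders_ids data (get_orders_ids data)

-- ===== LEMMAS AND PROOFS =====

-- A's loop, abstracted: the dict is replaced by the pure counter map it realises
def loopF (g : String → Int) : List (String × String) → List (String × String × String)
  | [] => []
  | p :: rest =>
    (pvFmt (pvYear p.2) (g (pvYear p.2) + 1), p.1, p.2)
      :: loopF (fun z => if z = pvYear p.2 then g (pvYear p.2) + 1 else g z) rest

theorem getD_step (d : PySem.Dict String Int) (y z : String) :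
    (if d.contains y = false then d.insert y 1 else d.modify y 0 (· + 1)).getD z 0
      = if z = y then d.getD y 0 + 1 else d.getD z 0 := by
  by_cases hc : d.contains y = false
  · rw [if_pos hc, PySem.Dict.getD_insert, PySem.Dict.getD_of_not_contains d 0 hc]
    by_cases hz : z = y <;> simp [hz]
  · rw [if_neg hc, PySem.Dict.getD_modify]

theorem foldA_eq_loopF : ∀ (s : List (String × String)) (d : PySem.Dict String Int)
    (acc : List (String × String × String)),
    (s.foldl
      (fun (st : PySem.Dict String Int × List (String × String × String)) p =>
        let year := pvYear p.2
        let yearly := if st.1.contains year = false then st.1.insert year 1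
                      else st.1.modify year 0 (· + 1)
        (yearly, st.2 ++ [(pvFmt year (yearly.getD year 0), p.1, p.2)]))
      (d, acc)).2 = acc ++ loopF (fun y => d.getD y 0) s := by
  intro s
  induction s with
  | nil => intro d acc; simp [loopF]
  | cons p s ih =>
    intro d acc
    rw [List.foldl_cons]
    simp only
    rw [ih]
    have hstep := getD_step d (pvYear p.2)
    rw [hstep (pvYear p.2)]
    have hg : (fun z => (if d.contains (pvYear p.2) = false then d.insert (pvYear p.2) 1
          else d.modify (pvYear p.2) 0 (· + 1)).getD z 0)
        = (fun z => if z = pvYear p.2 then d.getD (pvYear p.2) 0 + 1 else d.getD z 0) :=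
      funext fun z => hstep z
    rw [hg]
    simp [loopF]

-- one run of equal years advances the counter of that year by its length
theorem loopF_run : ∀ (run t : List (String × String)) (g : String → Int) (y : String),
    (∀ q ∈ run, pvYear q.2 = y) →
    loopF g (run ++ t)
      = (PySem.List.enumerate run (g y + 1)).map (fun kq => (pvFmt y kq.1, kq.2.1, kq.2.2))
        ++ loopF (fun z => if z = y then g y + (run.length : Int) else g z) t := by
  intro run
  induction run with
  | nil =>
    intro t g y _
    have hg : (fun z => if z = y then g y else g z) = g := by
      funext z; by_cases hz : z = y <;> simp [hz]
    simp only [List.nil_append, PySem.List.enumerate_nil, List.map_nil, List.length_nil,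
      Nat.cast_zero, add_zero, hg]
  | cons q run ih =>
    intro t g y hall
    have hq : pvYear q.2 = y := hall q (by simp)
    rw [List.cons_append]
    show (pvFmt (pvYear q.2) (g (pvYear q.2) + 1), q.1, q.2)
        :: loopF (fun z => if z = pvYear q.2 then g (pvYear q.2) + 1 else g z) (run ++ t) = _
    rw [hq]
    set g1 : String → Int := fun z => if z = y then g y + 1 else g z with hg1
    rw [ih t g1 y (fun r hr => hall r (by simp [hr]))]
    have hgy1 : g1 y = g y + 1 := by rw [hg1]; simp
    have hg2 : (fun z => if z = y then g y + 1 + (run.length : Int) else g1 z)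
        = (fun z => if z = y then g y + ((q :: run).length : Int) else g z) := by
      funext z
      by_cases hz : z = y
      · subst hz; rw [if_pos rfl, if_pos rfl]; simp only [List.length_cons]; push_cast; omega
      · rw [if_neg hz, if_neg hz, hg1]; simp [hz]
    rw [hgy1, hg2, PySem.List.enumerate_cons]
    simp only [List.map_cons, List.cons_append]

theorem pred_head_dropWhile {α : Type} (p : α → Bool) (l : List α) (x : α) (xs : List α)
    (h : l.dropWhile p = x :: xs) : p x = false := by
  have h2 := List.head_dropWhile_not p (l := l) (by simp [h])
  have h3 : (l.dropWhile p).head (by simp [h]) = x := by simp [h]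
  rwa [h3] at h2

-- lexicographic order: comparing 4-char prefixes never inverts the order
theorem take_lt : ∀ (n : Nat) (a b : List Char), a.take n < b.take n → a < b := by
  intro n
  induction n with
  | zero => simp
  | succ m ih =>
    intro a b h
    match a, b with
    | [], [] => simp at h
    | [], y :: b => exact List.Lex.nil
    | x :: a, [] => simp at h
    | x :: a, y :: b =>
      simp only [List.take_succ_cons] at h
      rcases List.cons_lt_cons_iff.mp h with h1 | ⟨h1, h2⟩
      · exact List.Lex.rel h1
      · exact h1 ▸ List.Lex.cons (ih a b h2)

theorem year_mono {s t : String} (h : s ≤ t) : pvYear s ≤ pvYear t := by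
  by_contra hnot
  have hlt : pvYear t < pvYear s := lt_of_not_ge hnot
  have hl := String.lt_iff_toList_lt.mp hlt
  have hsl : ∀ u : String, (pvYear u).toList = u.toList.take 4 := by
    intro u; simp [pvYear, PySem.Str.toList_slice, PySem.List.slice_to]
  rw [hsl, hsl] at hl
  exact absurd (String.lt_iff_toList_lt.mpr (take_lt 4 _ _ hl)) (not_lt.mpr h)

-- after a run of year y is dropped, year y never occurs again (sortedness)
theorem year_not_recur (y : String) (rest : List (String × String))
    (hpw : rest.Pairwise (fun a b => pvYear a.2 ≤ pvYear b.2))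
    (hall : ∀ q ∈ rest, y ≤ pvYear q.2) :
    ∀ q ∈ rest.dropWhile (fun q => pvYear q.2 == y), pvYear q.2 ≠ y := by
  intro q hq
  rcases hl : rest.dropWhile (fun q => pvYear q.2 == y) with _ | ⟨h, t'⟩
  · rw [hl] at hq; exact absurd hq (List.not_mem_nil)
  · have hne : pvYear h.2 ≠ y := by
      have := pred_head_dropWhile _ rest h t' hl
      simpa using this
    have hmemh : h ∈ rest := (List.dropWhile_sublist _).subset (by rw [hl]; simp)
    have hy : y < pvYear h.2 := lt_of_le_of_ne (hall h hmemh) (Ne.symm hne)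
    rw [hl] at hq
    rcases List.mem_cons.mp hq with rfl | hq'
    · exact hne
    · have hpw' : (h :: t').Pairwise (fun a b => pvYear a.2 ≤ pvYear b.2) := by
        rw [← hl]; exact hpw.sublist (List.dropWhile_sublist _)
      have hle := List.rel_of_pairwise_cons hpw' hq'
      intro hcon
      have hlt : y < pvYear q.2 := lt_of_lt_of_le hy hle
      rw [hcon] at hlt
      exact lt_irrefl y hlt

theorem loopF_eq_altRuns : ∀ (fuel : Nat) (s : List (String × String)) (g : String → Int),
    s.length ≤ fuel →
    s.Pairwise (fun a b => pvYear a.2 ≤ pvYear b.2) →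
    (∀ q ∈ s, g (pvYear q.2) = 0) →
    loopF g s = altRuns fuel s := by
  intro fuel
  induction fuel with
  | zero =>
    intro s g hlen _ _
    have : s = [] := List.eq_nil_of_length_eq_zero (Nat.le_zero.mp hlen)
    subst this; simp [loopF, altRuns]
  | succ fuel ih =>
    intro s g hlen hpw hzero
    match s with
    | [] => simp [loopF, altRuns]
    | p :: rest =>
      set y := pvYear p.2 with hy
      set pred : String × String → Bool := fun q => pvYear q.2 == y with hpred
      have hsplit : p :: rest = (p :: rest.takeWhile pred) ++ rest.dropWhile pred := by
        simp [List.takeWhile_append_dropWhile]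
      have hallrun : ∀ q ∈ p :: rest.takeWhile pred, pvYear q.2 = y := by
        intro q hq
        rcases List.mem_cons.mp hq with rfl | hq'
        · rfl
        · have := List.mem_takeWhile_imp hq'
          simpa [hpred] using this
      have hgy : g y = 0 := hzero p (by simp)
      have hrel : ∀ q ∈ rest, y ≤ pvYear q.2 := fun q hq =>
        List.rel_of_pairwise_cons hpw hq
      have hpwrest : rest.Pairwise (fun a b => pvYear a.2 ≤ pvYear b.2) :=
        List.Pairwise.of_cons hpw
      have hnorec := year_not_recur y rest hpwrest hrel
      conv_lhs => rw [hsplit]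
      rw [loopF_run _ _ g y hallrun, hgy]
      have hihcall : loopF (fun z => if z = y then 0 + (((p :: rest.takeWhile pred).length : Nat) : Int) else g z)
          (rest.dropWhile pred) = altRuns fuel (rest.dropWhile pred) := by
        apply ih
        · exact le_trans (List.length_dropWhile_le _ _)
            (by simp only [List.length_cons] at hlen; omega)
        · exact hpwrest.sublist (List.dropWhile_sublist _)
        · intro q hq
          have hne := hnorec q hq
          have hmem : q ∈ rest := (List.dropWhile_sublist _).subset hq
          have h0 : g (pvYear q.2) = 0 := hzero q (by simp [hmem])
          simp only [if_neg hne, h0]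
      rw [hihcall]
      simp only [altRuns, ← hy, ← hpred, zero_add]

-- ===== VERDICT (by name: the statement is the Claim_ definition above) =====
theorem get_orders_ids_spec : Claim_equal_get_orders_ids := by
  intro data _
  show get_orders_ids data = get_orders_ids_alt data
  unfold get_orders_ids get_orders_ids_alt
  rw [foldA_eq_loopF]
  simp only [List.nil_append]
  apply loopF_eq_altRuns
  · exact le_rfl
  · exact (PySem.List.sorted_pairwise data (fun x => x.2)).imp (fun h => year_mono h)
  · intro q _; exact PySem.Dict.getD_empty _ _
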